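-- pv_equiv track=rewrite | github.com/awslabs/decode-answer-logical-form | DecAF/Datasets/QA/utils.py | sort_SP_with_QA
-- ===== SOURCE A (Python) =====
-- from collections import defaultdict
--
-- def sort_SP_with_QA(SP_answers, QA_answers):
--     # assign scores to QA answers based on rank
--     QA_answers_score_dict = defaultdict(float)
--     for qa_i, answer in enumerate(QA_answers):
--         QA_answers_score_dict[answer] = 1/(1+qa_i)
--     # sort SP answers based on QA answers
--     SP_answers_sorted = []
--     for sp_i, answer in enumerate(SP_answers):
--         SP_answers_sorted.append({"answer": answer, "score": QA_answers_score_dict[answer]})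
--     SP_answers_sorted = sorted(SP_answers_sorted, key=lambda x: x["score"], reverse=True)
--     SP_answers_sorted_answers = [each["answer"] for each in SP_answers_sorted]
--     return SP_answers_sorted_answers
-- ===== SOURCE B (Python) =====
-- def sort_SP_with_QA(SP_answers, QA_answers):
--     # bucket sort: the comparison sort on rank scores is replaced by one pass
--     # into per-rank buckets (last QA index wins, absent answers go last)
--     last_index = {}
--     for i, answer in enumerate(QA_answers):
--         last_index[answer] = i
--     n = len(QA_answers)
--     buckets = [[] for _ in range(n + 1)]
--     for answer in SP_answers:
--         buckets[last_index.get(answer, n)].append(answer)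
--     out = []
--     for bucket in buckets:
--         out.extend(bucket)
--     return out
-- ===== Notes on version B (the rewrite author's own statement) =====
-- stated objective: faster
-- what changed: Replaces building score dicts plus a comparison sort with a single-pass bucket (counting) sort: each SP answer is dropped into the bucket of its last QA index (or an extra 'absent' bucket), and buckets are concatenated in rank order.
import Mathlib
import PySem

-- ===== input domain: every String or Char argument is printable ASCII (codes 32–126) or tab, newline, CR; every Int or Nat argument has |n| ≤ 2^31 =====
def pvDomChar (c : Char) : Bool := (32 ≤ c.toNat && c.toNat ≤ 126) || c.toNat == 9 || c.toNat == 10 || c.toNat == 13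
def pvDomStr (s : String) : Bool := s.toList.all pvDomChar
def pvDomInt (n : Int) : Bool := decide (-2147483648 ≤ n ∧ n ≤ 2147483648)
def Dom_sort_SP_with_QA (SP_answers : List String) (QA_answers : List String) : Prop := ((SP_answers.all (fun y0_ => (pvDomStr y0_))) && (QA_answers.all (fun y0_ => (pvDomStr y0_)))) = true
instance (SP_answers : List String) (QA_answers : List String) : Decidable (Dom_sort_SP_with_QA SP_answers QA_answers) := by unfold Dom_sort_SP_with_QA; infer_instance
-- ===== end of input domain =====

-- B replaces A's score-dict + comparison sort by a one-pass bucket sort over last QA indices (faster).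

-- ===== PORT A =====
-- The Python float score 1/(1+qa_i) is modelled exactly by the rational 1/(1+qa_i): the score is
-- used only as a sort key, and float rounding of 1/(1+i) is strictly decreasing in i (and > 0.0,
-- the defaultdict default) for every list length a Python list can have, so the orders coincide.
def sort_SP_with_QA (SP_answers : List String) (QA_answers : List String) : List String :=
  let score_dict : PySem.Dict String ℚ :=
    (PySem.List.enumerate QA_answers 0).foldl
      (fun d p => d.insert p.2 (1 / (1 + (p.1 : ℚ)))) PySem.Dict.empty
  let sp_sorted0 : List (String × ℚ) :=
    (PySem.List.enumerate SP_answers 0).foldl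
      (fun acc p => acc ++ [(p.2, score_dict.getD p.2 0)]) []
  let sp_sorted := PySem.List.sorted sp_sorted0 (fun x => x.2) true
  sp_sorted.map (fun x => x.1)

-- ===== PORT B =====
def sort_SP_with_QA_alt (SP_answers : List String) (QA_answers : List String) : List String :=
  let last_index : PySem.Dict String Nat :=
    (PySem.List.enumerate QA_answers 0).foldl
      (fun d p => d.insert p.2 p.1.toNat) PySem.Dict.empty
  let n := QA_answers.length
  let buckets : List (List String) := List.replicate (n + 1) []
  let buckets := SP_answers.foldl
    (fun bs a => bs.modify (last_index.getD a n) (fun b => b ++ [a])) buckets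
  buckets.foldl (fun out b => out ++ b) []

-- ===== PRECONDITION & SPEC =====
def Spec_sort_SP_with_QA (SP_answers : List String) (QA_answers : List String) (out : List String) : Prop := out = sort_SP_with_QA_alt SP_answers QA_answers
instance (SP_answers : List String) (QA_answers : List String) (out : List String) : Decidable (Spec_sort_SP_with_QA SP_answers QA_answers out) := by unfold Spec_sort_SP_with_QA; infer_instance

-- ===== CLAIM (what is proved, stated in full; the proofs are below) =====
def Claim_equal_sort_SP_with_QA : Prop := ∀ (SP_answers : List String) (QA_answers : List String), Dom_sort_SP_with_QA SP_answers QA_answers → Spec_sort_SP_with_QA SP_answers QA_answers (sort_SP_with_QA SP_answers QA_answers)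

-- ===== LEMMAS AND PROOFS =====

-- last index of a in xs (none if absent)
def pvLastIdx? (xs : List String) (a : String) : Option Nat :=
  if a ∈ xs then some (xs.length - 1 - xs.reverse.idxOf a) else none

-- the score of bucket j among n+1 buckets (bucket n = absent)
def pvF (n j : Nat) : ℚ := if j = n then 0 else 1 / (1 + (j : ℚ))

def pvK (QA : List String) (a : String) : Nat := (pvLastIdx? QA a).getD QA.length

theorem pvLastIdx?_lt (xs : List String) (a : String) (j : Nat)
    (h : pvLastIdx? xs a = some j) : j < xs.length := by
  unfold pvLastIdx? at h
  split at h
  · rename_i hm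
    have hlen : 0 < xs.length := List.length_pos_of_mem hm
    simp only [Option.some.injEq] at h
    omega
  · exact absurd h (by simp)

theorem pvLastIdx?_append (xs : List String) (x a : String) :
    pvLastIdx? (xs ++ [x]) a = if a = x then some xs.length else pvLastIdx? xs a := by
  unfold pvLastIdx?
  by_cases hax : a = x
  · subst hax
    simp [List.idxOf_cons_self]
  · have hmem : a ∈ xs ++ [x] ↔ a ∈ xs := by simp [hax]
    by_cases hm : a ∈ xs
    · have hx : a ∈ xs.reverse := by simpa using hm
      have hlt : xs.reverse.idxOf a < xs.reverse.length := List.idxOf_lt_length_of_mem hx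
      simp only [hmem, hm, if_true, hax, if_false]
      rw [List.reverse_append]
      simp [Ne.symm hax]
      omega
    · simp [hmem, hm, hax]

theorem pvK_le (QA : List String) (a : String) : pvK QA a ≤ QA.length := by
  unfold pvK
  cases h : pvLastIdx? QA a with
  | none => simp
  | some j => simpa using Nat.le_of_lt (pvLastIdx?_lt QA a j h)

-- the dicts both ports build are "last index" lookups
theorem pvDict_enum_get? {ν : Type} (v : Int → ν) (QA : List String) (a : String) :
    ((PySem.List.enumerate QA 0).foldl (fun d p => d.insert p.2 (v p.1)) PySem.Dict.empty).get? a
      = (pvLastIdx? QA a).map (fun j => v (j : Int)) := by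
  induction QA using List.reverseRecOn with
  | nil => simp [pvLastIdx?, PySem.List.enumerate]
  | append_singleton xs x ih =>
    rw [PySem.List.enumerate_append]
    have h1 : PySem.List.enumerate [x] (0 + (xs.length : Int)) = [((xs.length : Int), x)] := by
      simp [PySem.List.enumerate]
    rw [h1, List.foldl_append]
    simp only [List.foldl_cons, List.foldl_nil]
    rw [PySem.Dict.get?_insert]
    rw [pvLastIdx?_append]
    by_cases hax : a = x
    · simp [hax]
    · simp [hax, ih]

-- ===== the generic bucket = stable-insertion-sort argument =====

theorem pv_insertBy_nil {α : Type} (bef : α → α → Bool) (x : α) :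
    PySem.List.insertBy bef x ([] : List α) = [x] := rfl

theorem pv_insertBy_cons_true {α : Type} (bef : α → α → Bool) (x b : α) (bs : List α)
    (h : bef x b = true) : PySem.List.insertBy bef x (b :: bs) = x :: b :: bs := by
  simp [PySem.List.insertBy, h]

theorem pv_insertBy_append_false {α : Type} (bef : α → α → Bool) (x : α) (as bs : List α)
    (h : ∀ a ∈ as, bef x a = false) :
    PySem.List.insertBy bef x (as ++ bs) = as ++ PySem.List.insertBy bef x bs := by
  induction as with
  | nil => simp
  | cons a t ih =>
    have ha : bef x a = false := h a (by simp)
    rw [List.cons_append]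
    simp [PySem.List.insertBy, ha]
    exact ih (fun b hb => h b (by simp [hb]))

theorem pv_insertBy_flatMap {α κ : Type} [LinearOrder κ] (key : α → κ) (x : α)
    (vs : List κ) (g : κ → List α)
    (hvs : vs.Pairwise (· > ·)) (hx : key x ∈ vs)
    (hg : ∀ v ∈ vs, ∀ y ∈ g v, key y = v) :
    PySem.List.insertBy (fun a b => decide (key b < key a)) x (vs.flatMap g)
      = vs.flatMap (fun v => g v ++ if key x = v then [x] else []) := by
  induction vs with
  | nil => simp at hx
  | cons v vs ih =>
    rw [List.pairwise_cons] at hvs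
    obtain ⟨hv, hvs'⟩ := hvs
    rw [List.flatMap_cons, List.flatMap_cons]
    by_cases hxv : key x = v
    · -- x belongs to the head bucket: it passes g v and lands in front of the rest
      have hpass : ∀ a ∈ g v, (decide (key a < key x) : Bool) = false := by
        intro a ha
        have : key a = v := hg v (by simp) a ha
        simp [this, hxv]
      rw [pv_insertBy_append_false _ _ _ _ hpass]
      have htail : vs.flatMap (fun v' => g v' ++ if key x = v' then [x] else [])
          = vs.flatMap g := by
        rw [List.flatMap_def, List.flatMap_def]
        apply congrArg
        apply List.map_congr_left
        intro v' hv'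
        have hne : key x ≠ v' := by
          rw [hxv]; exact ne_of_gt (hv v' hv')
        simp [hne]
      rw [htail, if_pos hxv]
      cases hM : vs.flatMap g with
      | nil => simp [pv_insertBy_nil]
      | cons b M =>
        have hb : b ∈ vs.flatMap g := by rw [hM]; exact List.mem_cons_self
        obtain ⟨v', hv', hbv⟩ := List.mem_flatMap.mp hb
        have hkb : key b = v' := hg v' (by simp [hv']) b hbv
        have hbef : (decide (key b < key x) : Bool) = true := by
          rw [hkb, hxv]; simp; exact hv v' hv'
        rw [pv_insertBy_cons_true _ _ _ _ hbef]
        simp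
    · have hxvs : key x ∈ vs := by
        rcases List.mem_cons.mp hx with h | h
        · exact absurd h hxv
        · exact h
      have hlt : key x < v := hv _ hxvs
      have hpass : ∀ a ∈ g v, (decide (key a < key x) : Bool) = false := by
        intro a ha
        have hk : key a = v := hg v (by simp) a ha
        simp [hk]
        exact le_of_lt hlt
      rw [pv_insertBy_append_false _ _ _ _ hpass]
      rw [ih hvs' hxvs (fun v' hv' => hg v' (by simp [hv']))]
      simp [hxv]

theorem pv_foldl_insertBy_buckets {α κ : Type} [LinearOrder κ] (key : α → κ)
    (vs : List κ) (hvs : vs.Pairwise (· > ·)) :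
    ∀ L : List α, (∀ x ∈ L, key x ∈ vs) →
    L.foldl (fun acc x => PySem.List.insertBy (fun a b => decide (key b < key a)) x acc) []
      = vs.flatMap (fun v => L.filter (fun x => decide (key x = v))) := by
  intro L
  induction L using List.reverseRecOn with
  | nil => simp
  | append_singleton L x ih =>
    intro hmem
    rw [List.foldl_append]
    simp only [List.foldl_cons, List.foldl_nil]
    rw [ih (fun y hy => hmem y (by simp [hy]))]
    rw [pv_insertBy_flatMap key x vs _ hvs (hmem x (by simp))
      (by intro v hv y hy; exact of_decide_eq_true (List.mem_filter.mp hy).2)]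
    rw [List.flatMap_def, List.flatMap_def]
    apply congrArg
    apply List.map_congr_left
    intro v hv
    rw [List.filter_append]
    congr 1
    by_cases hkx : key x = v <;> simp [List.filter, hkx]

-- buckets after B's fold
theorem pv_foldl_modify_buckets (idx : String → Nat) (SP : List String) :
    ∀ bs : List (List String), (∀ a ∈ SP, idx a < bs.length) →
    SP.foldl (fun bs a => bs.modify (idx a) (fun b => b ++ [a])) bs
      = bs.mapIdx (fun j b => b ++ SP.filter (fun a => decide (idx a = j))) := by
  induction SP with
  | nil =>
    intro bs _
    simp only [List.foldl_nil, List.filter_nil, List.append_nil]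
    apply List.ext_getElem
    · simp
    · intro j h1 h2; simp
  | cons a SP ih =>
    intro bs hlt
    simp only [List.foldl_cons]
    rw [ih _ (fun a' ha' => by simpa using hlt a' (by simp [ha']))]
    apply List.ext_getElem
    · simp
    · intro j h1 h2
      simp only [List.getElem_mapIdx, List.getElem_modify]
      by_cases hja : idx a = j
      · simp [hja]
      · simp [hja]

theorem pv_mapIdx_replicate {β : Type} (m : Nat) (c : List String)
    (f : Nat → List String → β) :
    (List.replicate m c).mapIdx f = (List.range m).map (fun j => f j c) := by
  apply List.ext_getElem
  · simp
  · intro j h1 h2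
    simp

-- A's score dict lookup
theorem pvA_score (QA : List String) (a : String) :
    (((PySem.List.enumerate QA 0).foldl
        (fun d p => d.insert p.2 (1 / (1 + (p.1 : ℚ)))) PySem.Dict.empty).getD a 0)
      = pvF QA.length (pvK QA a) := by
  rw [PySem.Dict.getD_eq_get?_getD, pvDict_enum_get? (fun i => 1 / (1 + (i : ℚ)))]
  unfold pvK pvF
  cases h : pvLastIdx? QA a with
  | none => simp
  | some j =>
    have := pvLastIdx?_lt QA a j h
    simp [Nat.ne_of_lt this]

-- B's last-index dict lookup
theorem pvB_idx (QA : List String) (a : String) :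
    (((PySem.List.enumerate QA 0).foldl
        (fun d p => d.insert p.2 p.1.toNat) PySem.Dict.empty).getD a QA.length)
      = pvK QA a := by
  rw [PySem.Dict.getD_eq_get?_getD, pvDict_enum_get? (fun i => i.toNat)]
  unfold pvK
  cases h : pvLastIdx? QA a with
  | none => rfl
  | some j => simp

-- pvF is strictly decreasing on 0..n, hence injective there
theorem pvF_strict (n i j : Nat) (hij : i < j) (hj : j ≤ n) : pvF n j < pvF n i := by
  unfold pvF
  have hi : i ≠ n := by omega
  rw [if_neg hi]
  by_cases hjn : j = n
  · rw [if_pos hjn]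
    positivity
  · rw [if_neg hjn]
    apply one_div_lt_one_div_of_lt (by positivity)
    have : (i : ℚ) < (j : ℚ) := by exact_mod_cast hij
    linarith

theorem pvF_inj (n i j : Nat) (hi : i ≤ n) (hj : j ≤ n) (h : pvF n i = pvF n j) : i = j := by
  rcases Nat.lt_trichotomy i j with hlt | heq | hgt
  · exact absurd h (ne_of_gt (pvF_strict n i j hlt hj))
  · exact heq
  · exact absurd h (ne_of_lt (pvF_strict n j i hgt hi))

-- the common normal form of both ports
theorem pv_map_enum_snd {β : Type} (SP : List String) (g : String → β) :
    (PySem.List.enumerate SP 0).map (fun p => g p.2) = SP.map g := by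
  conv_rhs => rw [← PySem.List.map_snd_enumerate SP 0]
  rw [List.map_map]
  rfl

theorem pvA_eq (SP QA : List String) :
    sort_SP_with_QA SP QA
      = (List.range (QA.length + 1)).flatMap
          (fun j => SP.filter (fun a => decide (pvK QA a = j))) := by
  unfold sort_SP_with_QA
  dsimp only
  rw [PySem.List.foldl_append_singleton_eq_map, List.nil_append]
  rw [pv_map_enum_snd SP (fun a => (a, ((PySem.List.enumerate QA 0).foldl
      (fun d p => d.insert p.2 (1 / (1 + (p.1 : ℚ)))) PySem.Dict.empty).getD a 0))]
  have hG : (fun a => (a, ((PySem.List.enumerate QA 0).foldl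
      (fun d p => d.insert p.2 (1 / (1 + (p.1 : ℚ)))) PySem.Dict.empty).getD a 0))
      = fun a => (a, pvF QA.length (pvK QA a)) := by
    funext a; rw [pvA_score]
  rw [hG]
  rw [PySem.List.sorted_rev_eq_foldl_insertBy]
  rw [pv_foldl_insertBy_buckets (fun x : String × ℚ => x.2)
      ((List.range (QA.length + 1)).map (pvF QA.length))
      (by
        rw [List.pairwise_map]
        refine List.pairwise_lt_range.imp_of_mem ?_
        intro i j hi hj hij
        exact pvF_strict QA.length i j hij (by simpa using Nat.lt_succ_iff.mp (List.mem_range.mp hj)))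
      (SP.map (fun a => (a, pvF QA.length (pvK QA a))))
      (by
        intro x hx
        obtain ⟨a, _, rfl⟩ := List.mem_map.mp hx
        exact List.mem_map.mpr ⟨pvK QA a, List.mem_range.mpr (Nat.lt_succ_of_le (pvK_le QA a)), rfl⟩)]
  rw [List.map_flatMap, List.flatMap_map, List.flatMap_def, List.flatMap_def]
  apply congrArg
  apply List.map_congr_left
  intro j hj
  have hjn : j ≤ QA.length := Nat.lt_succ_iff.mp (List.mem_range.mp hj)
  rw [List.filter_map, List.map_map]
  have hid : ((fun x : String × ℚ => x.1) ∘ fun a => (a, pvF QA.length (pvK QA a))) = id := rfl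
  rw [hid, List.map_id]
  apply List.filter_congr
  intro a _
  simp only [Function.comp_apply]
  apply decide_eq_decide.mpr
  constructor
  · intro h; exact pvF_inj QA.length (pvK QA a) j (pvK_le QA a) hjn h
  · intro h; rw [h]

theorem pvB_eq (SP QA : List String) :
    sort_SP_with_QA_alt SP QA
      = (List.range (QA.length + 1)).flatMap
          (fun j => SP.filter (fun a => decide (pvK QA a = j))) := by
  unfold sort_SP_with_QA_alt
  simp only
  rw [PySem.List.foldl_append_eq_flatten]
  have hfun : (fun (bs : List (List String)) (a : String) =>
      bs.modify (((PySem.List.enumerate QA 0).foldl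
        (fun d p => d.insert p.2 p.1.toNat) PySem.Dict.empty).getD a QA.length)
        (fun b => b ++ [a]))
      = fun bs a => bs.modify (pvK QA a) (fun b => b ++ [a]) := by
    funext bs a
    rw [pvB_idx]
  rw [hfun]
  rw [pv_foldl_modify_buckets (fun a => pvK QA a) SP _
    (fun a _ => by simpa using Nat.lt_succ_of_le (pvK_le QA a))]
  rw [pv_mapIdx_replicate]
  simp [List.flatMap]

-- ===== VERDICT (by name: the statement is the Claim_ definition above) =====
theorem sort_SP_with_QA_spec : Claim_equal_sort_SP_with_QA := by
  intro SP QA _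
  unfold Spec_sort_SP_with_QA
  rw [pvA_eq, pvB_eq]
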